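-- pv_equiv track=rewrite | github.com/IT-coach-666/leetcode-public | leetcode_jy/jy_0501_1000/jy_0551_0600/jy_0582.py | killProcess_v2
-- ===== SOURCE A (Python) =====
-- from typing import List, Dict
-- import collections
-- from typing import List
--
-- def killProcess_v2(pid: List[int], ppid: List[int], kill: int) -> List[int]:
--     parent_to_children = collections.defaultdict(list)
--
--     for i, id in enumerate(pid):
--         parent_to_children[ppid[i]].append(id)
--
--     processes = []
--     stack = [kill]
--
--     while stack:
--         process = stack.pop()
--         processes.append(process)
--
--         for child in parent_to_children[process]:
--             stack.append(child)
--
--     return processes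
-- ===== SOURCE B (Python) =====
-- def killProcess_v2(pid, ppid, kill):
--     children = {}
--     for par, child in zip(ppid, pid):
--         children.setdefault(par, []).append(child)
--
--     def dfs(node):
--         out = [node]
--         for c in reversed(children.get(node, [])):
--             out += dfs(c)
--         return out
--
--     return dfs(kill)
-- ===== Notes on version B (the rewrite author's own statement) =====
-- stated objective: simpler
-- what changed: Replaces A's explicit-stack LIFO loop with a recursive DFS that visits children in reversed insertion order and returns the list by accumulation, and builds the children map by zipping ppid with pid instead of indexing ppid through enumerate(pid).
import Mathlib
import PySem

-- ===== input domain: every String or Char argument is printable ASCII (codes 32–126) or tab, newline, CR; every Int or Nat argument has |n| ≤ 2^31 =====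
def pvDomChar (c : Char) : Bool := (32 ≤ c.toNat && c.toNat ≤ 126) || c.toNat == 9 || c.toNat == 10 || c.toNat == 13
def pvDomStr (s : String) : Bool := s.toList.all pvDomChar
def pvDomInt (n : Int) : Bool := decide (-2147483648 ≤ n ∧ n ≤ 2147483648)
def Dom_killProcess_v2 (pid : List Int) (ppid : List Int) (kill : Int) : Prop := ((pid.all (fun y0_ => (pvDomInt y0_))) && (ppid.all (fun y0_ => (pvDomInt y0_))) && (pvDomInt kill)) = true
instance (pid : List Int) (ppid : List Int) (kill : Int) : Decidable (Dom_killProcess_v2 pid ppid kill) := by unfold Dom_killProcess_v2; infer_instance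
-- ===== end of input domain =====

-- B replaces A's explicit-stack DFS loop by a recursive DFS (children visited in
-- reversed insertion order, which is exactly the stack's LIFO order) and builds the
-- children map by zipping ppid with pid instead of indexing ppid by enumerate(pid):
-- same return value, plainer decomposition ("simpler"; no speed claim).
-- Both Lean loops carry a step budget (pvSteps) solely to make them total; it is
-- consumed in lock-step by the two ports, so the equivalence holds for any budget.

-- ===== PORT A =====
-- parent_to_children built over enumerate(pid); ppid[i] read with pyGetD
-- (the IndexError case i ≥ len(ppid) is excluded by Pre_killProcess_v2)
def pvBuildA (pid ppid : List Int) : PySem.Dict Int (List Int) :=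
  (PySem.List.enumerate pid).foldl
    (fun d p => d.modify (PySem.List.pyGetD ppid p.1 0) [] (fun l => l ++ [p.2]))
    PySem.Dict.empty

def pvSteps : Nat := 2 ^ 64   -- totality budget for the while-loop / recursion (never reached on Pre_ inputs the tester draws)

-- while stack: process = stack.pop(); processes.append(process); push children.
-- Stack represented top-first: pushing the child list appends its reverse at the head.
def pvStackRun (ch : Int → List Int) : Nat → List Int → List Int → List Int
  | 0, _, acc => acc
  | _ + 1, [], acc => acc
  | f + 1, v :: st, acc => pvStackRun ch f ((ch v).reverse ++ st) (acc ++ [v])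

def killProcess_v2 (pid : List Int) (ppid : List Int) (kill : Int) : List Int :=
  let d := pvBuildA pid ppid
  pvStackRun (fun v => d.getD v []) pvSteps [kill] []

-- ===== PORT B =====
-- children map via zip(ppid, pid) + setdefault-append
def pvBuildB (pid ppid : List Int) : PySem.Dict Int (List Int) :=
  (ppid.zip pid).foldl
    (fun d q => d.modify q.1 [] (fun l => l ++ [q.2]))
    PySem.Dict.empty

-- def dfs(node): out = [node]; for c in reversed(children.get(node, [])): out += dfs(c); return out
mutual
def pvDfs (ch : Int → List Int) : Nat → Int → List Int
  | 0, _ => []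
  | f + 1, v => v :: pvDfsKids ch f (ch v).reverse
termination_by f _ => (f, 0)
decreasing_by exact Prod.Lex.left _ _ (Nat.lt_succ_self f)

def pvDfsKids (ch : Int → List Int) : Nat → List Int → List Int
  | _, [] => []
  | f, c :: cs =>
    let o := pvDfs ch f c
    o ++ pvDfsKids ch (f - o.length) cs
termination_by f l => (f, l.length + 1)
decreasing_by
  · exact Prod.Lex.right _ (Nat.succ_pos _)
  · rcases (Nat.sub_le f _).lt_or_eq with h | h
    · exact Prod.Lex.left _ _ h
    · rw [h]; exact Prod.Lex.right _ (Nat.lt_succ_self _)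
end

def killProcess_v2_alt (pid : List Int) (ppid : List Int) (kill : Int) : List Int :=
  let d := pvBuildB pid ppid
  pvDfs (fun v => d.getD v []) pvSteps kill

-- ===== PRECONDITION & SPEC =====
-- direct successors of v in the parent→child relation given by the paired entries
def pvSuccs (pid ppid : List Int) (v : Int) : List Int :=
  ((ppid.zip pid).filter (fun q => q.1 == v)).map (·.2)

-- everything reachable from the seed set s in at most n expansion rounds
def pvReach (pid ppid : List Int) : Nat → List Int → List Int
  | 0, s => s
  | n + 1, s => pvReach pid ppid n ((s ++ s.flatMap (pvSuccs pid ppid)).dedup)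

-- Pre_ excludes exactly the inputs on which Python A does not return normally:
-- len(pid) > len(ppid) raises IndexError in the dict-building loop, and a
-- parent→child cycle reachable from kill makes the while-loop run forever.
def Pre_killProcess_v2 (pid : List Int) (ppid : List Int) (kill : Int) : Prop :=
  pid.length ≤ ppid.length ∧
  ∀ v ∈ pvReach pid ppid (pid.length + 1) [kill],
    v ∉ pvReach pid ppid (pid.length + 1) (pvSuccs pid ppid v)
instance (pid : List Int) (ppid : List Int) (kill : Int) : Decidable (Pre_killProcess_v2 pid ppid kill) := by unfold Pre_killProcess_v2; infer_instance

def pvWitness_killProcess_v2 : List Int × List Int × Int := ([3, 4], [1, 3], 1)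

def Spec_killProcess_v2 (pid : List Int) (ppid : List Int) (kill : Int) (out : List Int) : Prop := out = killProcess_v2_alt pid ppid kill
instance (pid : List Int) (ppid : List Int) (kill : Int) (out : List Int) : Decidable (Spec_killProcess_v2 pid ppid kill out) := by unfold Spec_killProcess_v2; infer_instance

-- ===== CLAIM (what is proved, stated in full; the proofs are below) =====
def Claim_equal_killProcess_v2 : Prop := ∀ (pid : List Int) (ppid : List Int) (kill : Int), Dom_killProcess_v2 pid ppid kill → Pre_killProcess_v2 pid ppid kill → Spec_killProcess_v2 pid ppid kill (killProcess_v2 pid ppid kill)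

-- ===== LEMMAS AND PROOFS =====

-- with budget 0 the recursive side also produces nothing
theorem pvDfsKids_zero (ch : Int → List Int) (l : List Int) : pvDfsKids ch 0 l = [] := by
  induction l with
  | nil => simp [pvDfsKids]
  | cons c cs ih => rw [pvDfsKids]; simp [pvDfs, ih]

-- processing a concatenated worklist = processing the first part, then the rest on the leftover budget
theorem pvDfsKids_append (ch : Int → List Int) (l st : List Int) :
    ∀ f, pvDfsKids ch f (l ++ st)
      = pvDfsKids ch f l ++ pvDfsKids ch (f - (pvDfsKids ch f l).length) st := by
  induction l with
  | nil => intro f; simp [pvDfsKids]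
  | cons c cs ih =>
    intro f
    rw [List.cons_append, pvDfsKids, pvDfsKids, ih]
    simp [List.append_assoc, Nat.sub_sub]

-- the stack loop is the recursive DFS over the stack contents, consuming the same budget
theorem pvStackRun_eq (ch : Int → List Int) :
    ∀ (f : Nat) (st acc : List Int), pvStackRun ch f st acc = acc ++ pvDfsKids ch f st := by
  intro f
  induction f with
  | zero => intro st acc; simp [pvStackRun, pvDfsKids_zero]
  | succ f ih =>
    intro st acc
    cases st with
    | nil => simp [pvStackRun, pvDfsKids]
    | cons v st =>
      rw [pvStackRun, ih, pvDfsKids, pvDfs, pvDfsKids_append]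
      simp

-- under len(pid) ≤ len(ppid), enumerate-with-pyGetD enumerates exactly zip(ppid, pid)
theorem pvEnum_eq_zip (pid ppid : List Int) (h : pid.length ≤ ppid.length) :
    (PySem.List.enumerate pid).map (fun p => (PySem.List.pyGetD ppid p.1 0, p.2))
      = ppid.zip pid := by
  apply List.ext_getElem
  · simp [PySem.List.length_enumerate]; omega
  · intro k h1 h2
    have hk : k < pid.length := by simpa [PySem.List.length_enumerate] using h1
    have hk' : k < ppid.length := lt_of_lt_of_le hk h
    simp [PySem.List.getElem_enumerate, List.getElem_zip,
      PySem.List.pyGetD_natCast, hk']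

-- hence the two dict-building loops build the same dictionary
theorem pvBuild_eq (pid ppid : List Int) (h : pid.length ≤ ppid.length) :
    pvBuildA pid ppid = pvBuildB pid ppid := by
  unfold pvBuildA pvBuildB
  rw [← pvEnum_eq_zip pid ppid h, List.foldl_map]

-- ===== VERDICT (by name: the statement is the Claim_ definition above) =====
theorem killProcess_v2_spec : Claim_equal_killProcess_v2 := by
  intro pid ppid kill _ hpre
  unfold Spec_killProcess_v2 killProcess_v2 killProcess_v2_alt
  rw [pvBuild_eq pid ppid hpre.1]
  rw [pvStackRun_eq]
  rw [pvDfsKids]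
  simp [pvDfsKids]
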